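-- pv_equiv track=rewrite | github.com/enoki/bandleader | qtest.py | note_to_goo_3_4
-- ===== SOURCE A (Python) =====
-- def note_to_goo_3_4(note, duration, bar_index):
--     goo = []
--
--     beat_offset = bar_index % 4
--
--     if beat_offset in (1, 3):
--         goo.append((note, '16'))
--         duration -= 1
--         bar_index += 1
--     elif beat_offset == 2 and duration >= 2:
--         goo.append((note, '8'))
--         duration -= 2
--         bar_index += 2
--     else: # beat_offset == 0
--         if duration == 1:
--             goo.append((note, '16'))
--         elif duration == 2:
--             goo.append((note, '8'))
--         elif duration == 3:
--             goo.append((note, '8.'))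
--         elif duration == 4:
--             goo.append((note, '4'))
--         elif duration == 5:
--             goo.append((note, '4'))
--             goo.append(('~', '0'))
--             goo.append((note, '16'))
--         elif duration == 6:
--             goo.append((note, '4.'))
--         elif duration == 7:
--             goo.append((note, '4'))
--             goo.append(('~', '0'))
--             goo.append((note, '8.'))
--         elif duration == 8:
--             goo.append((note, '2'))
--         elif duration == 9:
--             goo.append((note, '2'))
--             goo.append(('~', '0'))
--             goo.append((note, '16'))
--         elif duration == 10:
--             goo.append((note, '2'))
--             goo.append(('~', '0'))
--             goo.append((note, '8'))
--         elif duration == 11: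
--             goo.append((note, '2'))
--             goo.append(('~', '0'))
--             goo.append((note, '8.'))
--         elif duration == 12:
--             goo.append((note, '2.'))
--         return goo
--
--     if duration > 0:
--         goo.append(('~', '0'))
--         goo.extend(note_to_goo_3_4(note, duration, bar_index))
--
--     return goo
-- ===== SOURCE B (Python) =====
-- _TABLE = {1: ['16'], 2: ['8'], 3: ['8.'], 4: ['4'], 5: ['4', '16'],
--           6: ['4.'], 7: ['4', '8.'], 8: ['2'], 9: ['2', '16'],
--           10: ['2', '8'], 11: ['2', '8.'], 12: ['2.']}
--
-- def note_to_goo_3_4(note, duration, bar_index):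
--     goo = []
--     while True:
--         beat_offset = bar_index % 4
--         if beat_offset in (1, 3):
--             goo.append((note, '16'))
--             duration -= 1
--             bar_index += 1
--         elif beat_offset == 2 and duration >= 2:
--             goo.append((note, '8'))
--             duration -= 2
--             bar_index += 2
--         else:
--             for i, d in enumerate(_TABLE.get(duration, [])):
--                 if i:
--                     goo.append(('~', '0'))
--                 goo.append((note, d))
--             return goo
--         if duration > 0:
--             goo.append(('~', '0'))
--         else:
--             return goo
-- ===== Notes on version B (the rewrite author's own statement) =====
-- stated objective: alternative
-- what changed: Replaced A's self-recursion (each call concatenating a fresh list) by a single iterative loop with one accumulator list, and replaced the inline 12-branch duration chain by a duration-to-tokens lookup table joined with tie separators.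
import Mathlib
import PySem

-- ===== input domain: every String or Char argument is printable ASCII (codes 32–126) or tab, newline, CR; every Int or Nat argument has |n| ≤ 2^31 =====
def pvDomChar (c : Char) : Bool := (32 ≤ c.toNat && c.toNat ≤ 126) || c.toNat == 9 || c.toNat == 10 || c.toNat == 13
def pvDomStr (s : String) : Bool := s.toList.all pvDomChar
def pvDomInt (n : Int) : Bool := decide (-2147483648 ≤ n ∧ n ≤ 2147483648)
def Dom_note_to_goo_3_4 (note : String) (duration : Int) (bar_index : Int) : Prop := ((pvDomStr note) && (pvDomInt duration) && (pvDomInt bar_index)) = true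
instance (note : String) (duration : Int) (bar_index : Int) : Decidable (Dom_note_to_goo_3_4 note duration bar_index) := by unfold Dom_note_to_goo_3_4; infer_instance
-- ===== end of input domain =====

-- B replaces A's self-recursion by a tail loop with an accumulator and replaces the
-- inline 12-branch chain by a duration→tokens table joined with tie separators (objective: alternative).

-- ===== PORT A =====
def note_to_goo_3_4 (note : String) (duration : Int) (bar_index : Int) : List (String × String) :=
  let beat_offset := PySem.Int.mod bar_index 4
  if beat_offset = 1 ∨ beat_offset = 3 then
    let goo := [(note, "16")]
    let duration := duration - 1
    let bar_index := bar_index + 1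
    goo ++ (if duration > 0 then [(("~" : String), ("0" : String))] ++ note_to_goo_3_4 note duration bar_index else [])
  else if beat_offset = 2 ∧ duration ≥ 2 then
    let goo := [(note, "8")]
    let duration := duration - 2
    let bar_index := bar_index + 2
    goo ++ (if duration > 0 then [(("~" : String), ("0" : String))] ++ note_to_goo_3_4 note duration bar_index else [])
  else
    if duration = 1 then [(note, "16")]
    else if duration = 2 then [(note, "8")]
    else if duration = 3 then [(note, "8.")]
    else if duration = 4 then [(note, "4")]
    else if duration = 5 then [(note, "4"), ("~", "0"), (note, "16")]
    else if duration = 6 then [(note, "4.")]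
    else if duration = 7 then [(note, "4"), ("~", "0"), (note, "8.")]
    else if duration = 8 then [(note, "2")]
    else if duration = 9 then [(note, "2"), ("~", "0"), (note, "16")]
    else if duration = 10 then [(note, "2"), ("~", "0"), (note, "8")]
    else if duration = 11 then [(note, "2"), ("~", "0"), (note, "8.")]
    else if duration = 12 then [(note, "2.")]
    else []
termination_by duration.toNat
decreasing_by all_goals omega

-- ===== PORT B =====
def pvTable : PySem.Dict Int (List String) :=
  PySem.Dict.ofList [(1, ["16"]), (2, ["8"]), (3, ["8."]), (4, ["4"]), (5, ["4", "16"]),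
    (6, ["4."]), (7, ["4", "8."]), (8, ["2"]), (9, ["2", "16"]),
    (10, ["2", "8"]), (11, ["2", "8."]), (12, ["2."])]

def pvEmitTable (note : String) (parts : List String) (goo : List (String × String)) : List (String × String) :=
  (PySem.List.enumerate parts).foldl
    (fun g p => (if p.1 ≠ 0 then g ++ [(("~" : String), ("0" : String))] else g) ++ [(note, p.2)]) goo

def pvLoop (note : String) (duration : Int) (bar_index : Int) (goo : List (String × String)) : List (String × String) :=
  let beat_offset := PySem.Int.mod bar_index 4
  if beat_offset = 1 ∨ beat_offset = 3 then
    let goo := goo ++ [(note, "16")]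
    let duration := duration - 1
    let bar_index := bar_index + 1
    if duration > 0 then pvLoop note duration bar_index (goo ++ [(("~" : String), ("0" : String))]) else goo
  else if beat_offset = 2 ∧ duration ≥ 2 then
    let goo := goo ++ [(note, "8")]
    let duration := duration - 2
    let bar_index := bar_index + 2
    if duration > 0 then pvLoop note duration bar_index (goo ++ [(("~" : String), ("0" : String))]) else goo
  else
    pvEmitTable note (pvTable.getD duration []) goo
termination_by duration.toNat
decreasing_by all_goals omega

def note_to_goo_3_4_alt (note : String) (duration : Int) (bar_index : Int) : List (String × String) :=
  pvLoop note duration bar_index []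

-- ===== PRECONDITION & SPEC =====
def Spec_note_to_goo_3_4 (note : String) (duration : Int) (bar_index : Int) (out : List (String × String)) : Prop := out = note_to_goo_3_4_alt note duration bar_index
instance (note : String) (duration : Int) (bar_index : Int) (out : List (String × String)) : Decidable (Spec_note_to_goo_3_4 note duration bar_index out) := by unfold Spec_note_to_goo_3_4; infer_instance

-- ===== CLAIM (what is proved, stated in full; the proofs are below) =====
def Claim_equal_note_to_goo_3_4 : Prop := ∀ (note : String) (duration : Int) (bar_index : Int), Dom_note_to_goo_3_4 note duration bar_index → Spec_note_to_goo_3_4 note duration bar_index (note_to_goo_3_4 note duration bar_index)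

-- ===== LEMMAS AND PROOFS =====

-- B's table-joined emission equals A's inline 12-branch chain, appended to the accumulator.
lemma pvEmitTable_eq (note : String) (duration : Int) (goo : List (String × String)) :
    pvEmitTable note (pvTable.getD duration []) goo =
      goo ++ (if duration = 1 then [(note, "16")]
        else if duration = 2 then [(note, "8")]
        else if duration = 3 then [(note, "8.")]
        else if duration = 4 then [(note, "4")]
        else if duration = 5 then [(note, "4"), ("~", "0"), (note, "16")]
        else if duration = 6 then [(note, "4.")]
        else if duration = 7 then [(note, "4"), ("~", "0"), (note, "8.")]
        else if duration = 8 then [(note, "2")]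
        else if duration = 9 then [(note, "2"), ("~", "0"), (note, "16")]
        else if duration = 10 then [(note, "2"), ("~", "0"), (note, "8")]
        else if duration = 11 then [(note, "2"), ("~", "0"), (note, "8.")]
        else if duration = 12 then [(note, "2.")]
        else []) := by
  by_cases h1 : duration = 1
  · subst h1
    rw [show pvTable.getD 1 [] = ["16"] from by decide]
    simp [pvEmitTable, PySem.List.enumerate_cons, PySem.List.enumerate_nil, List.foldl]
  rw [if_neg h1]
  by_cases h2 : duration = 2
  · subst h2
    rw [show pvTable.getD 2 [] = ["8"] from by decide]
    simp [pvEmitTable, PySem.List.enumerate_cons, PySem.List.enumerate_nil, List.foldl]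
  rw [if_neg h2]
  by_cases h3 : duration = 3
  · subst h3
    rw [show pvTable.getD 3 [] = ["8."] from by decide]
    simp [pvEmitTable, PySem.List.enumerate_cons, PySem.List.enumerate_nil, List.foldl]
  rw [if_neg h3]
  by_cases h4 : duration = 4
  · subst h4
    rw [show pvTable.getD 4 [] = ["4"] from by decide]
    simp [pvEmitTable, PySem.List.enumerate_cons, PySem.List.enumerate_nil, List.foldl]
  rw [if_neg h4]
  by_cases h5 : duration = 5
  · subst h5
    rw [show pvTable.getD 5 [] = ["4", "16"] from by decide]
    simp [pvEmitTable, PySem.List.enumerate_cons, PySem.List.enumerate_nil, List.foldl]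
  rw [if_neg h5]
  by_cases h6 : duration = 6
  · subst h6
    rw [show pvTable.getD 6 [] = ["4."] from by decide]
    simp [pvEmitTable, PySem.List.enumerate_cons, PySem.List.enumerate_nil, List.foldl]
  rw [if_neg h6]
  by_cases h7 : duration = 7
  · subst h7
    rw [show pvTable.getD 7 [] = ["4", "8."] from by decide]
    simp [pvEmitTable, PySem.List.enumerate_cons, PySem.List.enumerate_nil, List.foldl]
  rw [if_neg h7]
  by_cases h8 : duration = 8
  · subst h8
    rw [show pvTable.getD 8 [] = ["2"] from by decide]
    simp [pvEmitTable, PySem.List.enumerate_cons, PySem.List.enumerate_nil, List.foldl]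
  rw [if_neg h8]
  by_cases h9 : duration = 9
  · subst h9
    rw [show pvTable.getD 9 [] = ["2", "16"] from by decide]
    simp [pvEmitTable, PySem.List.enumerate_cons, PySem.List.enumerate_nil, List.foldl]
  rw [if_neg h9]
  by_cases h10 : duration = 10
  · subst h10
    rw [show pvTable.getD 10 [] = ["2", "8"] from by decide]
    simp [pvEmitTable, PySem.List.enumerate_cons, PySem.List.enumerate_nil, List.foldl]
  rw [if_neg h10]
  by_cases h11 : duration = 11
  · subst h11
    rw [show pvTable.getD 11 [] = ["2", "8."] from by decide]
    simp [pvEmitTable, PySem.List.enumerate_cons, PySem.List.enumerate_nil, List.foldl]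
  rw [if_neg h11]
  by_cases h12 : duration = 12
  · subst h12
    rw [show pvTable.getD 12 [] = ["2."] from by decide]
    simp [pvEmitTable, PySem.List.enumerate_cons, PySem.List.enumerate_nil, List.foldl]
  rw [if_neg h12]
  have ht : pvTable.getD duration [] = [] := by
    rw [show pvTable = ⟨[(1, ["16"]), (2, ["8"]), (3, ["8."]), (4, ["4"]), (5, ["4", "16"]),
      (6, ["4."]), (7, ["4", "8."]), (8, ["2"]), (9, ["2", "16"]),
      (10, ["2", "8"]), (11, ["2", "8."]), (12, ["2."])]⟩ from by decide]
    simp [PySem.Dict.getD, PySem.Dict.get?, Ne.symm h1, Ne.symm h2, Ne.symm h3, Ne.symm h4,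
      Ne.symm h5, Ne.symm h6, Ne.symm h7, Ne.symm h8, Ne.symm h9, Ne.symm h10, Ne.symm h11,
      Ne.symm h12]
  simp [ht, pvEmitTable, PySem.List.enumerate_nil]

lemma pvLoop_eq (note : String) : ∀ (n : Nat) (d b : Int) (goo : List (String × String)),
    d.toNat ≤ n → pvLoop note d b goo = goo ++ note_to_goo_3_4 note d b := by
  intro n
  induction n with
  | zero =>
    intro d b goo hd
    rw [pvLoop, note_to_goo_3_4]
    dsimp only
    by_cases h1 : PySem.Int.mod b 4 = 1 ∨ PySem.Int.mod b 4 = 3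
    · rw [if_pos h1, if_pos h1, if_neg (by omega : ¬ d - 1 > 0),
        if_neg (by omega : ¬ d - 1 > 0)]
      simp
    rw [if_neg h1, if_neg h1]
    by_cases h2 : PySem.Int.mod b 4 = 2 ∧ d ≥ 2
    · exact absurd hd (by omega)
    rw [if_neg h2, if_neg h2]
    exact pvEmitTable_eq note d goo
  | succ n ih =>
    intro d b goo hd
    rw [pvLoop, note_to_goo_3_4]
    dsimp only
    by_cases h1 : PySem.Int.mod b 4 = 1 ∨ PySem.Int.mod b 4 = 3
    · rw [if_pos h1, if_pos h1]
      by_cases hi : d - 1 > 0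
      · rw [if_pos hi, if_pos hi, ih (d - 1) (b + 1) _ (by omega)]
        simp
      · rw [if_neg hi, if_neg hi]
        simp
    rw [if_neg h1, if_neg h1]
    by_cases h2 : PySem.Int.mod b 4 = 2 ∧ d ≥ 2
    · rw [if_pos h2, if_pos h2]
      by_cases hi2 : d - 2 > 0
      · rw [if_pos hi2, if_pos hi2, ih (d - 2) (b + 2) _ (by omega)]
        simp
      · rw [if_neg hi2, if_neg hi2]
        simp
    rw [if_neg h2, if_neg h2]
    exact pvEmitTable_eq note d goo

-- ===== VERDICT (by name: the statement is the Claim_ definition above) =====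
theorem note_to_goo_3_4_spec : Claim_equal_note_to_goo_3_4 := by
  intro note duration bar_index _
  unfold Spec_note_to_goo_3_4 note_to_goo_3_4_alt
  rw [pvLoop_eq note duration.toNat duration bar_index [] (le_refl _)]
  simp
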